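-- pv_equiv track=rewrite | github.com/Sbauermaner/StudioCore-API | full_system_audit_all_modules_v1.py | find_unused
-- ===== SOURCE A (Python) =====
-- from collections import defaultdict, deque
-- from typing import Any, Dict, List, Set, Tuple, Optional
--
-- def find_unused(graph: Dict[str, Set[str]],
--                entry_point: str = "studiocore.core_v6") -> List[str]:
--     """Findet ungenutzte Module."""
--     if entry_point not in graph:
--         return []
--
--     reachable = set()
--     queue = deque([entry_point])
--
--     while queue:
--         node = queue.popleft()
--         if node in reachable:
--             continue
--         reachable.add(node)
--
--         for neighbor in graph.get(node, set()):
--             if neighbor not in reachable: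
--                 queue.append(neighbor)
--
--     all_modules = set(graph.keys())
--     unused = all_modules - reachable
--
--     return list(unused)
-- ===== SOURCE B (Python) =====
-- def find_unused(graph, entry_point="studiocore.core_v6"):
--     """Findet ungenutzte Module (round-based set saturation instead of a BFS worklist)."""
--     if entry_point not in graph:
--         return []
--
--     reachable = {entry_point}
--     while True:
--         frontier = {nb for node in reachable
--                        for nb in graph.get(node, set())
--                        if nb not in reachable}
--         if not frontier:
--             break
--         reachable |= frontier
--
--     return list(set(graph.keys()) - reachable)
-- ===== Notes on version B (the rewrite author's own statement) =====
-- stated objective: alternative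
-- what changed: Replaces A's deque-based worklist BFS (pop one node, push its unseen neighbours) by round-based set saturation: repeatedly add the whole frontier set ({nb for node in reachable for nb in graph.get(node)} minus reachable) until it is empty; the guard and the final set difference are unchanged.
import Mathlib
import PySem

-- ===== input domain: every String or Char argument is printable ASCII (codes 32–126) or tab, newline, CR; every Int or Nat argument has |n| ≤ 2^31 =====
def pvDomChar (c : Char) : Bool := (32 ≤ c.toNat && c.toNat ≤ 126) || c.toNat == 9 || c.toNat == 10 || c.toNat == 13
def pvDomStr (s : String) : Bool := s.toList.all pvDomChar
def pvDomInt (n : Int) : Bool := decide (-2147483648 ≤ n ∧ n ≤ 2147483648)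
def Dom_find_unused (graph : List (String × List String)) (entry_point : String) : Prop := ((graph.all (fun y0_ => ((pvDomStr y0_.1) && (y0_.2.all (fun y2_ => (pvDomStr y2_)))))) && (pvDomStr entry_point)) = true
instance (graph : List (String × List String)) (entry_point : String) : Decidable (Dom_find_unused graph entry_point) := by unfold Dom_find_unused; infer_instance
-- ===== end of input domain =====

-- B replaces A's deque worklist BFS by round-based set saturation (repeatedly add the whole
-- frontier until the reachable set is stable); same return value, objective: alternative.

-- ===== PORT A =====
-- helpers shared by the two ports only as Python primitives: first-match dict lookup
-- pvAdj g x = graph.get(x, set())  (dict lookup with default; first match on the association list)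
def pvAdj (graph : List (String × List String)) (x : String) : List String :=
  (List.lookup x graph).getD []

-- pvUniv / pvT are used only by the termination measures of the loops below
def pvUniv (graph : List (String × List String)) : List String :=
  PySem.Set.ofList (graph.map Prod.fst ++ graph.flatMap Prod.snd)

def pvT (graph : List (String × List String)) : Nat :=
  (graph.flatMap Prod.snd).length

-- termination helper lemmas (used by the decreasing_by proofs of the two loops)
theorem pv_lookup_some_mem {a : String} {v : List String} {l : List (String × List String)}
    (h : List.lookup a l = some v) : (a, v) ∈ l := by
  induction l with
  | nil => simp [List.lookup] at h
  | cons p t ih =>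
    rcases hb : a == p.1 with _ | _ <;> rw [List.lookup_cons] at h <;> simp only [hb] at h
    · right; exact ih h
    · cases h
      have := eq_of_beq hb
      exact List.mem_cons.2 (Or.inl (by simp [this]))

theorem pv_lookup_none {a : String} {l : List (String × List String)}
    (h : ¬ a ∈ l.map Prod.fst) : List.lookup a l = none := by
  induction l with
  | nil => rfl
  | cons p t ih =>
    simp only [List.map_cons, List.mem_cons, not_or] at h
    have hb : (a == p.1) = false := by simpa using h.1
    rw [List.lookup_cons]
    simp only [hb]
    exact ih h.2

theorem pv_adj_mem_univ {graph : List (String × List String)} {x nb : String}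
    (h : nb ∈ pvAdj graph x) : nb ∈ pvUniv graph := by
  unfold pvAdj at h
  rcases hl : List.lookup x graph with _ | v
  · rw [hl] at h; simp at h
  · rw [hl] at h
    simp only [Option.getD_some] at h
    have hmem : (x, v) ∈ graph := pv_lookup_some_mem hl
    unfold pvUniv
    rw [PySem.Set.mem_ofList]
    exact List.mem_append.2 (Or.inr (List.mem_flatMap.2 ⟨(x, v), hmem, h⟩))

theorem pv_adj_nil_of_not_univ {graph : List (String × List String)} {x : String}
    (h : ¬ x ∈ pvUniv graph) : pvAdj graph x = [] := by
  have hk : ¬ x ∈ graph.map Prod.fst := by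
    intro hx
    exact h (by unfold pvUniv; rw [PySem.Set.mem_ofList]; exact List.mem_append.2 (Or.inl hx))
  unfold pvAdj
  rw [pv_lookup_none hk]
  rfl

theorem pv_adj_len_le (graph : List (String × List String)) (x : String) :
    (pvAdj graph x).length ≤ pvT graph := by
  unfold pvAdj pvT
  rcases hl : List.lookup x graph with _ | v
  · simp
  · simp only [Option.getD_some]
    have hmem : (x, v) ∈ graph := pv_lookup_some_mem hl
    calc v.length ≤ ((x, v).2.length) := le_refl _
      _ ≤ (graph.flatMap Prod.snd).length := by
          rw [List.length_flatMap]
          exact List.single_le_sum (by intro y _; positivity) _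
            (List.mem_map.2 ⟨(x, v), hmem, rfl⟩)

theorem pv_filter_len_lt {l : List String} {p q : String → Bool}
    (hmono : ∀ x, q x = true → p x = true) {a : String} (ha : a ∈ l)
    (hpa : p a = true) (hqa : q a = false) :
    (l.filter q).length < (l.filter p).length := by
  induction l with
  | nil => simp at ha
  | cons b t ih =>
    have hle : (t.filter q).length ≤ (t.filter p).length :=
      (List.monotone_filter_right t hmono).length_le
    rcases List.mem_cons.1 ha with rfl | hat
    · simp only [List.filter_cons, hpa, hqa, if_pos, if_neg, Bool.false_eq_true,
        not_false_eq_true, List.length_cons]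
      omega
    · have h2 : q b = true → p b = true := hmono b
      rcases hq : q b with _ | _ <;> rcases hp : p b with _ | _ <;>
        simp only [List.filter_cons, hq, hp, if_pos, List.length_cons,
          Bool.false_eq_true, if_neg, not_false_eq_true]
      · exact ih hat
      · exact lt_of_lt_of_le (ih hat) (Nat.le_succ _)
      · exact absurd (h2 hq) (by simp [hp])
      · exact Nat.succ_lt_succ (ih hat)

theorem pv_filter_len_le {l : List String} {p q : String → Bool}
    (hmono : ∀ x, q x = true → p x = true) :
    (l.filter q).length ≤ (l.filter p).length :=
  (List.monotone_filter_right l hmono).length_le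

-- the 'while queue:' loop of A, state = (queue, reachable)
def bfsLoop (graph : List (String × List String)) (queue : List String)
    (reach : PySem.Set String) : PySem.Set String :=
  match queue with
  | [] => reach
  | node :: rest =>
    if h : node ∈ reach then
      bfsLoop graph rest reach
    else
      let reach' := PySem.Set.add reach node
      bfsLoop graph (rest ++ (pvAdj graph node).filter (fun nb => decide (¬ nb ∈ reach'))) reach'
termination_by ((pvUniv graph).filter (fun x => decide (¬ x ∈ reach))).length * (pvT graph + 2) + queue.length
decreasing_by
  · simp only [List.length_cons]
    omega
  · have hmono : ∀ x, (decide (¬ x ∈ PySem.Set.add reach node)) = true →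
        (decide (¬ x ∈ reach)) = true := by
      intro x hx
      simp only [decide_eq_true_eq] at hx ⊢
      exact fun hxr => hx ((PySem.Set.mem_add reach node x).2 (Or.inl hxr))
    by_cases hu : node ∈ pvUniv graph
    · have hlt := pv_filter_len_lt (l := pvUniv graph) hmono hu
        (by simpa using h) (by simp [PySem.Set.mem_add])
      have hadds : ((pvAdj graph node).filter
          (fun nb => decide (¬ nb ∈ PySem.Set.add reach node))).length ≤ pvT graph :=
        le_trans (List.length_filter_le _ _) (pv_adj_len_le graph node)
      have h2 : (List.filter (fun x => decide (¬ x ∈ PySem.Set.add reach node)) (pvUniv graph)).length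
            * (pvT graph + 2) + (pvT graph + 2)
          ≤ (List.filter (fun x => decide (¬ x ∈ reach)) (pvUniv graph)).length * (pvT graph + 2) := by
        calc _ = ((List.filter (fun x => decide (¬ x ∈ PySem.Set.add reach node)) (pvUniv graph)).length + 1)
            * (pvT graph + 2) := by ring
        _ ≤ _ := Nat.mul_le_mul_right _ (Nat.succ_le_of_lt hlt)
      simp only [List.length_append, List.length_cons]
      linarith [h2, hadds]
    · have hz : pvAdj graph node = [] := pv_adj_nil_of_not_univ hu
      have hle := pv_filter_len_le (l := pvUniv graph) hmono
      rw [hz]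
      simp only [List.filter_nil, List.append_nil, List.length_cons]
      have h2 := Nat.mul_le_mul_right (pvT graph + 2) hle
      omega

def find_unused (graph : List (String × List String)) (entry_point : String) : List String :=
  if (graph.map Prod.fst).contains entry_point then
    let reachable := bfsLoop graph [entry_point] PySem.Set.empty
    PySem.Set.diff (PySem.Set.ofList (graph.map Prod.fst)) reachable
  else []

-- ===== PORT B =====
-- frontier = {nb for node in reachable for nb in graph.get(node, set()) if nb not in reachable}
def satFrontier (graph : List (String × List String)) (reach : PySem.Set String) : PySem.Set String :=
  reach.foldl
    (fun acc node =>
      (pvAdj graph node).foldl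
        (fun acc2 nb => if nb ∈ reach then acc2 else PySem.Set.add acc2 nb) acc)
    PySem.Set.empty

-- membership characterisation of the frontier (cited by satLoop's decreasing_by)
theorem pv_mem_inner_fold {R acc : PySem.Set String} {l : List String} {x : String} :
    x ∈ l.foldl (fun a nb => if nb ∈ R then a else PySem.Set.add a nb) acc ↔
      x ∈ acc ∨ (x ∈ l ∧ ¬ x ∈ R) := by
  induction l generalizing acc with
  | nil => simp
  | cons b t ih =>
    rw [List.foldl_cons]
    by_cases hb : b ∈ R
    · rw [if_pos hb, ih]
      constructor
      · rintro (hx | ⟨hxt, hxR⟩)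
        · exact Or.inl hx
        · exact Or.inr ⟨List.mem_cons.2 (Or.inr hxt), hxR⟩
      · rintro (hx | ⟨hxbt, hxR⟩)
        · exact Or.inl hx
        · rcases List.mem_cons.1 hxbt with rfl | hxt
          · exact absurd hb hxR
          · exact Or.inr ⟨hxt, hxR⟩
    · rw [if_neg hb, ih]
      rw [PySem.Set.mem_add]
      constructor
      · rintro ((hx | rfl) | ⟨hxt, hxR⟩)
        · exact Or.inl hx
        · exact Or.inr ⟨List.mem_cons.2 (Or.inl rfl), hb⟩
        · exact Or.inr ⟨List.mem_cons.2 (Or.inr hxt), hxR⟩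
      · rintro (hx | ⟨hxbt, hxR⟩)
        · exact Or.inl (Or.inl hx)
        · rcases List.mem_cons.1 hxbt with rfl | hxt
          · exact Or.inl (Or.inr rfl)
          · exact Or.inr ⟨hxt, hxR⟩

theorem mem_satFrontier {graph : List (String × List String)} {reach : PySem.Set String} {x : String} :
    x ∈ satFrontier graph reach ↔ ∃ node ∈ reach, x ∈ pvAdj graph node ∧ ¬ x ∈ reach := by
  unfold satFrontier
  have gen : ∀ (nodes : List String) (acc : PySem.Set String),
      x ∈ nodes.foldl (fun acc node => (pvAdj graph node).foldl
        (fun acc2 nb => if nb ∈ reach then acc2 else PySem.Set.add acc2 nb) acc) acc ↔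
      x ∈ acc ∨ ∃ node ∈ nodes, x ∈ pvAdj graph node ∧ ¬ x ∈ reach := by
    intro nodes
    induction nodes with
    | nil => simp
    | cons b t ih =>
      intro acc
      rw [List.foldl_cons, ih, pv_mem_inner_fold]
      constructor
      · rintro ((hx | ⟨hxa, hxR⟩) | ⟨node, hnode, hadj, hxR⟩)
        · exact Or.inl hx
        · exact Or.inr ⟨b, List.mem_cons.2 (Or.inl rfl), hxa, hxR⟩
        · exact Or.inr ⟨node, List.mem_cons.2 (Or.inr hnode), hadj, hxR⟩
      · rintro (hx | ⟨node, hnode, hadj, hxR⟩)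
        · exact Or.inl (Or.inl hx)
        · rcases List.mem_cons.1 hnode with rfl | hnt
          · exact Or.inl (Or.inr ⟨hadj, hxR⟩)
          · exact Or.inr ⟨node, hnt, hadj, hxR⟩
  rw [gen]
  simp

-- the 'while True: … if not frontier: break' loop of B
def satLoop (graph : List (String × List String)) (reach : PySem.Set String) : PySem.Set String :=
  let frontier := satFrontier graph reach
  if h : frontier = [] then reach
  else satLoop graph (PySem.Set.union reach frontier)
termination_by ((pvUniv graph).filter (fun x => decide (¬ x ∈ reach))).length
decreasing_by
  obtain ⟨nb, hnb⟩ := List.exists_mem_of_ne_nil _ h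
  rcases mem_satFrontier.1 hnb with ⟨node, hnode, hadj, hnotr⟩
  exact pv_filter_len_lt
    (by intro x hx
        simp only [decide_eq_true_eq] at hx ⊢
        exact fun hxr => hx ((PySem.Set.mem_union reach _ x).2 (Or.inl hxr)))
    (pv_adj_mem_univ hadj)
    (by simpa using hnotr)
    (by have hm : nb ∈ PySem.Set.union reach (satFrontier graph reach) :=
          (PySem.Set.mem_union reach _ nb).2 (Or.inr hnb)
        simp [hm])

def find_unused_alt (graph : List (String × List String)) (entry_point : String) : List String :=
  if (graph.map Prod.fst).contains entry_point then
    PySem.Set.diff (PySem.Set.ofList (graph.map Prod.fst))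
      (satLoop graph (PySem.Set.add PySem.Set.empty entry_point))
  else []

-- ===== PRECONDITION & SPEC =====
def Spec_find_unused (graph : List (String × List String)) (entry_point : String) (out : List String) : Prop := out = find_unused_alt graph entry_point
instance (graph : List (String × List String)) (entry_point : String) (out : List String) : Decidable (Spec_find_unused graph entry_point out) := by unfold Spec_find_unused; infer_instance

-- ===== CLAIM (what is proved, stated in full; the proofs are below) =====
def Claim_equal_find_unused : Prop := ∀ (graph : List (String × List String)) (entry_point : String), Dom_find_unused graph entry_point → Spec_find_unused graph entry_point (find_unused graph entry_point)

-- ===== LEMMAS AND PROOFS =====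

-- reachability from the entry point along the adjacency of `graph`
inductive PvReach (graph : List (String × List String)) (e : String) : String → Prop
  | base : PvReach graph e e
  | step {x nb : String} : PvReach graph e x → nb ∈ pvAdj graph x → PvReach graph e nb

theorem pv_reach_min {graph : List (String × List String)} {e : String} {S : List String}
    (he : e ∈ S) (hcl : ∀ x ∈ S, ∀ nb ∈ pvAdj graph x, nb ∈ S) :
    ∀ x, PvReach graph e x → x ∈ S := by
  intro x hx
  induction hx with
  | base => exact he
  | step hr hnb ih => exact hcl _ ih _ hnb

theorem bfs_spec {graph : List (String × List String)} {e : String} :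
    ∀ (queue : List String) (reach : PySem.Set String),
    (∀ x ∈ reach, PvReach graph e x) → (∀ x ∈ queue, PvReach graph e x) →
    (∀ x ∈ reach, ∀ nb ∈ pvAdj graph x, nb ∈ reach ∨ nb ∈ queue) →
    (∀ x ∈ bfsLoop graph queue reach, PvReach graph e x) ∧
    (∀ x ∈ reach, x ∈ bfsLoop graph queue reach) ∧
    (∀ x ∈ queue, x ∈ bfsLoop graph queue reach) ∧
    (∀ x ∈ bfsLoop graph queue reach, ∀ nb ∈ pvAdj graph x, nb ∈ bfsLoop graph queue reach) := by
  intro queue reach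
  induction queue, reach using bfsLoop.induct (graph := graph) with
  | case1 reach =>
    intro h1 _ h3
    rw [bfsLoop]
    refine ⟨h1, fun x hx => hx, fun x hx => by simp at hx, fun x hx nb hnb => ?_⟩
    rcases h3 x hx nb hnb with h | h
    · exact h
    · simp at h
  | case2 reach node rest hmem ih =>
    intro h1 h2 h3
    rw [bfsLoop]
    simp only [dif_pos hmem]
    have h2' : ∀ x ∈ rest, PvReach graph e x := fun x hx => h2 x (List.mem_cons_of_mem _ hx)
    have h3' : ∀ x ∈ reach, ∀ nb ∈ pvAdj graph x, nb ∈ reach ∨ nb ∈ rest := by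
      intro x hx nb hnb
      rcases h3 x hx nb hnb with h | h
      · exact Or.inl h
      · rcases List.mem_cons.1 h with rfl | h
        · exact Or.inl hmem
        · exact Or.inr h
    obtain ⟨c1, c2, c3, c4⟩ := ih h1 h2' h3'
    refine ⟨c1, c2, fun x hx => ?_, c4⟩
    rcases List.mem_cons.1 hx with rfl | hx
    · exact c2 x hmem
    · exact c3 x hx
  | case3 reach node rest hmem reach' ih =>
    intro h1 h2 h3
    have hre : reach' = PySem.Set.add reach node := rfl
    rw [hre] at ih
    rw [bfsLoop]
    simp only [dif_neg hmem]
    have hnode : PvReach graph e node := h2 node (List.mem_cons.2 (Or.inl rfl))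
    have h1' : ∀ x ∈ reach.add node, PvReach graph e x := by
      intro x hx
      rcases (PySem.Set.mem_add reach node x).1 hx with h | rfl
      · exact h1 x h
      · exact hnode
    have h2' : ∀ x ∈ rest ++ (pvAdj graph node).filter (fun nb => decide (¬ nb ∈ reach.add node)),
        PvReach graph e x := by
      intro x hx
      rcases List.mem_append.1 hx with h | h
      · exact h2 x (List.mem_cons_of_mem _ h)
      · exact PvReach.step hnode (List.mem_of_mem_filter h)
    have h3' : ∀ x ∈ reach.add node, ∀ nb ∈ pvAdj graph x,
        nb ∈ reach.add node ∨
        nb ∈ rest ++ (pvAdj graph node).filter (fun nb => decide (¬ nb ∈ reach.add node)) := by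
      intro x hx nb hnb
      rcases (PySem.Set.mem_add reach node x).1 hx with hxr | rfl
      · rcases h3 x hxr nb hnb with h | h
        · exact Or.inl ((PySem.Set.mem_add reach node nb).2 (Or.inl h))
        · rcases List.mem_cons.1 h with rfl | h
          · exact Or.inl ((PySem.Set.mem_add reach nb nb).2 (Or.inr rfl))
          · exact Or.inr (List.mem_append.2 (Or.inl h))
      · by_cases hr : nb ∈ reach.add x
        · exact Or.inl hr
        · exact Or.inr (List.mem_append.2 (Or.inr (List.mem_filter.2 ⟨hnb, by simpa using hr⟩)))
    obtain ⟨c1, c2, c3, c4⟩ := ih h1' h2' h3'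
    refine ⟨c1, fun x hx => c2 x ((PySem.Set.mem_add reach node x).2 (Or.inl hx)), ?_, c4⟩
    intro x hx
    rcases List.mem_cons.1 hx with rfl | hx
    · exact c2 x ((PySem.Set.mem_add reach x x).2 (Or.inr rfl))
    · exact c3 x (List.mem_append.2 (Or.inl hx))

theorem sat_spec {graph : List (String × List String)} {e : String} :
    ∀ (reach : PySem.Set String),
    (∀ x ∈ reach, PvReach graph e x) →
    (∀ x ∈ satLoop graph reach, PvReach graph e x) ∧
    (∀ x ∈ reach, x ∈ satLoop graph reach) ∧
    (∀ x ∈ satLoop graph reach, ∀ nb ∈ pvAdj graph x, nb ∈ satLoop graph reach) := by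
  intro reach
  induction reach using satLoop.induct (graph := graph) with
  | case1 reach frontier hf =>
    intro h1
    have hfr : frontier = satFrontier graph reach := rfl
    rw [hfr] at hf
    rw [satLoop]
    simp only [dif_pos hf]
    refine ⟨h1, fun x hx => hx, ?_⟩
    intro x hx nb hnb
    by_cases hr : nb ∈ reach
    · exact hr
    · exfalso
      have hmem : nb ∈ satFrontier graph reach := mem_satFrontier.2 ⟨x, hx, hnb, hr⟩
      rw [hf] at hmem
      simp at hmem
  | case2 reach frontier hf ih =>
    intro h1
    have hfr : frontier = satFrontier graph reach := rfl
    rw [hfr] at hf ih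
    rw [satLoop]
    simp only [dif_neg hf]
    have h1' : ∀ x ∈ reach.union (satFrontier graph reach), PvReach graph e x := by
      intro x hx
      rcases (PySem.Set.mem_union reach _ x).1 hx with h | h
      · exact h1 x h
      · rcases mem_satFrontier.1 h with ⟨node, hnode, hadj, _⟩
        exact PvReach.step (h1 node hnode) hadj
    obtain ⟨c1, c2, c3⟩ := ih h1'
    exact ⟨c1, fun x hx => c2 x ((PySem.Set.mem_union reach _ x).2 (Or.inl hx)), c3⟩

-- ===== VERDICT (by name: the statement is the Claim_ definition above) =====
theorem find_unused_spec : Claim_equal_find_unused := by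
  unfold Claim_equal_find_unused Spec_find_unused
  intro graph e _
  unfold find_unused find_unused_alt
  by_cases hg : (graph.map Prod.fst).contains e = true
  · simp only [hg, if_pos]
    obtain ⟨a1, a2, a3, a4⟩ := bfs_spec (graph := graph) (e := e) [e] PySem.Set.empty
      (by intro x hx; simp [PySem.Set.empty] at hx)
      (by intro x hx
          rcases List.mem_cons.1 hx with rfl | h
          · exact PvReach.base
          · simp at h)
      (by intro x hx; simp [PySem.Set.empty] at hx)
    obtain ⟨b1, b2, b3⟩ := sat_spec (graph := graph) (e := e) (PySem.Set.add PySem.Set.empty e)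
      (by intro x hx
          rcases (PySem.Set.mem_add _ _ _).1 hx with h | rfl
          · simp [PySem.Set.empty] at h
          · exact PvReach.base)
    have heA : e ∈ bfsLoop graph [e] PySem.Set.empty := a3 e (List.mem_cons.2 (Or.inl rfl))
    have heB : e ∈ satLoop graph (PySem.Set.add PySem.Set.empty e) :=
      b2 e ((PySem.Set.mem_add _ _ _).2 (Or.inr rfl))
    have hiff : ∀ x, (x ∈ bfsLoop graph [e] PySem.Set.empty) ↔
        (x ∈ satLoop graph (PySem.Set.add PySem.Set.empty e)) := by
      intro x
      constructor
      · intro hx; exact pv_reach_min heB b3 x (a1 x hx)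
      · intro hx; exact pv_reach_min heA a4 x (b1 x hx)
    unfold PySem.Set.diff
    apply List.filter_congr
    intro x _
    simp only [PySem.Set.contains, List.contains_eq_mem]
    exact congrArg (fun b => !b) (decide_eq_decide.mpr (hiff x))
  · simp only [hg]
    rfl
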